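-- pv_equiv track=rewrite | github.com/austwel/advent-of-code | 2023/python/14/14.py | moveall
-- ===== SOURCE A (Python) =====
-- def moveall(boulders: list, static: list):
--     boulders.sort(key=lambda x: x[0])
--     n_static, n_flexi = static.copy(), []
--     for boulder in boulders:
--         new = move(boulder, n_static)
--         n_static.append(new)
--         n_flexi.append(new)
--     return n_flexi
--
-- def move(boulder: tuple[int, int], static: list[tuple[int, int]]) -> tuple[int, tuple[int, int]]:
--     row, col = boulder
--     inline = [s for s in static if s[1] == col]
--     while row >= 0:
--         if (row, col) in inline:
--             return (row+1, col)
--         row -= 1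
--     return (0, col)
-- ===== SOURCE B (Python) =====
-- def moveall(boulders: list, static: list):
--     boulders.sort(key=lambda x: x[0])
--     cols = {}
--     for r, c in static:
--         cols.setdefault(c, []).append(r)
--     state = {}
--     out = []
--     for r, c in boulders:
--         if c in state:
--             rem, i, base, last = state[c]
--         else:
--             rem, i, base, last = sorted(cols.get(c, [])), 0, 0, None
--         while i < len(rem) and rem[i] <= r:
--             base = max(base, rem[i] + 1)
--             i += 1
--         if last is not None and last <= r:
--             base = max(base, last + 1)
--         out.append((base, c))
--         state[c] = (rem, i, base, base)
--     return out
-- ===== Notes on version B (the rewrite author's own statement) =====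
-- stated objective: faster
-- what changed: A re-scans all same-column rocks and walks row-by-row down to 0 for every boulder; B groups static rocks per column once, sorts each column, and places boulders in one pass keeping per-column state (remaining sorted statics, landing floor, last settled row), so each static row is visited once per column.
import Mathlib
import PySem

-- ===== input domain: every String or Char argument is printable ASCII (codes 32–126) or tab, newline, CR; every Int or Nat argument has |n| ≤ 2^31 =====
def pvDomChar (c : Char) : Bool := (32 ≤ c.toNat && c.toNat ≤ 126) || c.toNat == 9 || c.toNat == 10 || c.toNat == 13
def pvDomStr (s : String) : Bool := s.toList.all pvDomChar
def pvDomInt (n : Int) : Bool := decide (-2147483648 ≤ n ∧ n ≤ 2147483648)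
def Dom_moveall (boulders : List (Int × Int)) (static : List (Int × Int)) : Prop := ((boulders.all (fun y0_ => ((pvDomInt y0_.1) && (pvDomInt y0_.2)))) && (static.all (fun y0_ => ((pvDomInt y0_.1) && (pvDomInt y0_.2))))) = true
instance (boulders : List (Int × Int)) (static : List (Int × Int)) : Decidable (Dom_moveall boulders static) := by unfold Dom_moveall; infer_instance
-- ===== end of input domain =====

-- B replaces A's per-boulder downward row scan over all inline rocks by per-column incremental
-- placement over sorted static rows (objective: faster). Like A, B sorts `boulders` in place;
-- the equivalence proved here is about the return value.

-- ===== PORT A =====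
-- the `while row >= 0` loop of Python's `move`
def pvMoveLoop (row col : Int) (inline : List (Int × Int)) : Int × Int :=
  if h : 0 ≤ row then
    if (row, col) ∈ inline then (row + 1, col)
    else pvMoveLoop (row - 1) col inline
  else (0, col)
termination_by (row + 1).toNat
decreasing_by omega

def pvMove (b : Int × Int) (static : List (Int × Int)) : Int × Int :=
  pvMoveLoop b.1 b.2 (static.filter (fun s => s.2 == b.2))

def moveall (boulders : List (Int × Int)) (static : List (Int × Int)) : List (Int × Int) :=
  ((PySem.List.sorted boulders (fun x => x.1) false).foldl
    (fun (acc : List (Int × Int) × List (Int × Int)) bo =>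
      let new := pvMove bo acc.1
      (acc.1 ++ [new], acc.2 ++ [new]))
    (static, [])).2

-- ===== PORT B =====
-- Source B's inner `while i < len(rem) and rem[i] <= r` loop; Source B advances an index i into the fixed
-- sorted list, the port keeps the not-yet-visited suffix — same scan, same values
def pvDrain (rem : List Int) (base r : Int) : List Int × Int :=
  match rem with
  | [] => ([], base)
  | s :: rest => if s ≤ r then pvDrain rest (max base (s + 1)) r else (s :: rest, base)

-- one iteration of Source B's `for r, c in boulders` loop; state per column = (rem, base, last)
def pvStepB (cols : PySem.Dict Int (List Int))
    (acc : PySem.Dict Int (List Int × Int × Option Int) × List (Int × Int))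
    (bo : Int × Int) : PySem.Dict Int (List Int × Int × Option Int) × List (Int × Int) :=
  let st := match acc.1.get? bo.2 with
    | some s => s
    | none => (PySem.List.sorted (cols.getD bo.2 []) (fun x => x) false, 0, none)
  let dr := pvDrain st.1 st.2.1 bo.1
  let base2 := match st.2.2 with
    | some l => if l ≤ bo.1 then max dr.2 (l + 1) else dr.2
    | none => dr.2
  (acc.1.insert bo.2 (dr.1, base2, some base2), acc.2 ++ [(base2, bo.2)])

def moveall_alt (boulders : List (Int × Int)) (static : List (Int × Int)) : List (Int × Int) :=
  let bs := PySem.List.sorted boulders (fun x => x.1) false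
  -- cols.setdefault(c, []).append(r)  =  modify c [] (· ++ [r])
  let cols := static.foldl (fun d (p : Int × Int) => d.modify p.2 [] (· ++ [p.1])) PySem.Dict.empty
  (bs.foldl (pvStepB cols) (PySem.Dict.empty, [])).2

-- ===== PRECONDITION & SPEC =====
def Spec_moveall (boulders : List (Int × Int)) (static : List (Int × Int)) (out : List (Int × Int)) : Prop := out = moveall_alt boulders static
instance (boulders : List (Int × Int)) (static : List (Int × Int)) (out : List (Int × Int)) : Decidable (Spec_moveall boulders static out) := by unfold Spec_moveall; infer_instance

-- ===== CLAIM (what is proved, stated in full; the proofs are below) =====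
def Claim_equal_moveall : Prop := ∀ (boulders : List (Int × Int)) (static : List (Int × Int)), Dom_moveall boulders static → Spec_moveall boulders static (moveall boulders static)

-- ===== LEMMAS AND PROOFS =====

-- rows of the given list that sit in column c
def pvRows (l : List (Int × Int)) (c : Int) : List Int := (l.filter (fun p => p.2 == c)).map (·.1)

-- landing row: max of 0 and s+1 over the obstacle rows s ≤ r
def pvMaxNext (r : Int) (l : List Int) : Int := l.foldl (fun a s => if s ≤ r then max a (s + 1) else a) 0

theorem pvMaxNext_foldl (r : Int) (l : List Int) : ∀ a : Int, 0 ≤ a →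
    l.foldl (fun a s => if s ≤ r then max a (s + 1) else a) a = max a (pvMaxNext r l) := by
  induction l with
  | nil => intro a ha; simp [pvMaxNext]; omega
  | cons s t ih =>
    intro a ha
    have h1 := ih (if s ≤ r then max a (s + 1) else a) (by split <;> omega)
    have h2 := ih (if s ≤ r then max 0 (s + 1) else 0) (by split <;> omega)
    simp only [pvMaxNext, List.foldl_cons] at *
    rw [h1, h2]
    split <;> omega

theorem pvMaxNext_nonneg (r : Int) (l : List Int) : 0 ≤ pvMaxNext r l := by
  induction l with
  | nil => simp [pvMaxNext]
  | cons s t ih =>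
    have h := pvMaxNext_foldl r t (if s ≤ r then max 0 (s + 1) else 0) (by split <;> omega)
    simp only [pvMaxNext, List.foldl_cons] at *
    rw [h]; split <;> omega

theorem pvMaxNext_cons (r s : Int) (l : List Int) :
    pvMaxNext r (s :: l) = max (if s ≤ r then s + 1 else 0) (pvMaxNext r l) := by
  have h := pvMaxNext_foldl r l (if s ≤ r then max 0 (s + 1) else 0) (by split <;> omega)
  have hn := pvMaxNext_nonneg r l
  simp only [pvMaxNext, List.foldl_cons] at *
  rw [h]; split <;> omega

theorem le_pvMaxNext (r s : Int) (l : List Int) (hm : s ∈ l) (hs : s ≤ r) :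
    s + 1 ≤ pvMaxNext r l := by
  induction l with
  | nil => simp at hm
  | cons x t ih =>
    rw [pvMaxNext_cons]
    rcases List.mem_cons.mp hm with h | h
    · subst h; rw [if_pos hs]; omega
    · have := ih h; omega

theorem pvMaxNext_le (r m : Int) (l : List Int) (h : ∀ s ∈ l, s ≤ r → s + 1 ≤ m) (h0 : 0 ≤ m) :
    pvMaxNext r l ≤ m := by
  induction l with
  | nil => simp [pvMaxNext]; omega
  | cons x t ih =>
    rw [pvMaxNext_cons]
    have hx := h x (List.mem_cons_self)
    have ht := ih (fun s hs => h s (List.mem_cons_of_mem _ hs))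
    split <;> [skip; skip] <;> rename_i hc
    · have := hx hc; omega
    · omega

theorem pvMaxNext_cases (r : Int) (l : List Int) :
    pvMaxNext r l = 0 ∨ ∃ o ∈ l, o ≤ r ∧ pvMaxNext r l = o + 1 := by
  induction l with
  | nil => left; simp [pvMaxNext]
  | cons x t ih =>
    rw [pvMaxNext_cons]
    have hn := pvMaxNext_nonneg r t
    by_cases hc : x ≤ r
    · simp only [hc, if_pos]
      rcases ih with h | ⟨o, ho, hor, he⟩
      · by_cases hx : pvMaxNext r t ≤ x + 1
        · right; exact ⟨x, List.mem_cons_self, hc, by omega⟩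
        · rw [h] at *; omega
      · by_cases hx : pvMaxNext r t ≤ x + 1
        · right; exact ⟨x, List.mem_cons_self, hc, by omega⟩
        · right; exact ⟨o, List.mem_cons_of_mem _ ho, hor, by omega⟩
    · simp only [hc, if_false]
      rcases ih with h | ⟨o, ho, hor, he⟩
      · left; omega
      · right; exact ⟨o, List.mem_cons_of_mem _ ho, hor, by omega⟩

theorem pvMaxNext_eq_of_mem_iff (r : Int) (l l' : List Int) (h : ∀ s, s ∈ l ↔ s ∈ l') :
    pvMaxNext r l = pvMaxNext r l' := by
  have h1 : pvMaxNext r l ≤ pvMaxNext r l' := by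
    rcases pvMaxNext_cases r l with hc | ⟨o, ho, hor, he⟩
    · rw [hc]; exact pvMaxNext_nonneg r l'
    · rw [he]; exact le_pvMaxNext r o l' ((h o).mp ho) hor
  have h2 : pvMaxNext r l' ≤ pvMaxNext r l := by
    rcases pvMaxNext_cases r l' with hc | ⟨o, ho, hor, he⟩
    · rw [hc]; exact pvMaxNext_nonneg r l
    · rw [he]; exact le_pvMaxNext r o l ((h o).mpr ho) hor
  omega

theorem pvMaxNext_pred (r : Int) (l : List Int) (h : r ∉ l) :
    pvMaxNext r l = pvMaxNext (r - 1) l := by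
  induction l with
  | nil => simp [pvMaxNext]
  | cons x t ih =>
    have hx : x ≠ r := fun he => h (he ▸ List.mem_cons_self)
    have ht := ih (fun hm => h (List.mem_cons_of_mem _ hm))
    rw [pvMaxNext_cons, pvMaxNext_cons, ht]
    have hiff : (x ≤ r) ↔ (x ≤ r - 1) := by omega
    simp only [hiff]

theorem pvMoveLoop_eq (r c : Int) (inline : List (Int × Int)) (h : ∀ p ∈ inline, p.2 = c) :
    pvMoveLoop r c inline = (pvMaxNext r (inline.map (·.1)), c) := by
  induction r using pvMoveLoop.induct (col := c) (inline := inline) with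
  | case1 r h0 hmem =>
    rw [pvMoveLoop]; simp only [h0, hmem, if_pos, dif_pos]
    have h1 : r ∈ inline.map (·.1) := List.mem_map.mpr ⟨(r, c), hmem, rfl⟩
    have h2 : r + 1 ≤ pvMaxNext r (inline.map (·.1)) := le_pvMaxNext r r _ h1 le_rfl
    have h3 : pvMaxNext r (inline.map (·.1)) ≤ r + 1 :=
      pvMaxNext_le r (r + 1) _ (fun s _ hs => by omega) (by omega)
    exact Prod.ext (by omega) rfl
  | case2 r h0 hmem ih =>
    rw [pvMoveLoop]; simp only [h0, hmem, dif_pos, if_false]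
    rw [ih]
    have hr : r ∉ inline.map (·.1) := by
      intro hr
      rcases List.mem_map.mp hr with ⟨p, hp, hp1⟩
      have hp2 := h p hp
      have hpe : (r, c) = p := by rw [← hp1, ← hp2]
      exact hmem (hpe ▸ hp)
    rw [← pvMaxNext_pred r _ hr]
  | case3 r h0 =>
    rw [pvMoveLoop, dif_neg h0]
    have h2 : pvMaxNext r (inline.map (·.1)) ≤ 0 :=
      pvMaxNext_le r 0 _ (fun s _ hs => by omega) le_rfl
    have h3 := pvMaxNext_nonneg r (inline.map (·.1))
    exact Prod.ext (by omega) rfl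

theorem pvDrain_eq (r : Int) : ∀ (rem : List Int) (base : Int), rem.Pairwise (· ≤ ·) → 0 ≤ base →
    pvDrain rem base r = (rem.dropWhile (fun s => decide (s ≤ r)), max base (pvMaxNext r rem)) := by
  intro rem
  induction rem with
  | nil =>
    intro base _ hb
    have : max base (pvMaxNext r []) = base := by simp [pvMaxNext]; omega
    simp [pvDrain, this]
  | cons s rest ih =>
    intro base hp hb
    have hx := List.pairwise_cons.mp hp
    by_cases hs : s ≤ r
    · rw [pvDrain]; simp only [hs, if_pos]
      rw [ih (max base (s + 1)) hx.2 (by omega)]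
      have h1 : List.dropWhile (fun s => decide (s ≤ r)) (s :: rest)
          = List.dropWhile (fun s => decide (s ≤ r)) rest := by
        simp [List.dropWhile, hs]
      have h2 : max (max base (s + 1)) (pvMaxNext r rest) = max base (pvMaxNext r (s :: rest)) := by
        rw [pvMaxNext_cons]
        have := pvMaxNext_nonneg r rest
        simp only [hs, if_pos]; omega
      rw [h1, h2]
    · rw [pvDrain]; simp only [hs, if_false]
      have h1 : List.dropWhile (fun s => decide (s ≤ r)) (s :: rest) = s :: rest := by
        simp [List.dropWhile, hs]
      have h2 : pvMaxNext r (s :: rest) = 0 := by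
        have hle : pvMaxNext r (s :: rest) ≤ 0 := by
          apply pvMaxNext_le
          · intro x hxm hxr
            rcases List.mem_cons.mp hxm with h | h
            · omega
            · have := hx.1 x h; omega
          · omega
        have := pvMaxNext_nonneg r (s :: rest)
        omega
      rw [h1, h2]
      have : max base 0 = base := by omega
      rw [this]

theorem pvDropWhile_filter (r : Int) : ∀ l : List Int, l.Pairwise (· ≤ ·) →
    l.dropWhile (fun s => decide (s ≤ r)) = l.filter (fun s => decide (r < s)) := by
  intro l
  induction l with
  | nil => simp
  | cons x t ih =>
    intro hp
    have hx := List.pairwise_cons.mp hp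
    by_cases hxr : x ≤ r
    · have h1 : decide (x ≤ r) = true := by simp [hxr]
      have h2 : decide (r < x) = false := by simp; omega
      simp only [List.dropWhile, List.filter, h1, h2]
      exact ih hx.2
    · have h1 : decide (x ≤ r) = false := by simp; omega
      have h2 : decide (r < x) = true := by simp; omega
      simp only [List.dropWhile, List.filter, h1, h2]
      rw [List.filter_eq_self.mpr]
      intro y hy
      have := hx.1 y hy
      simp; omega

theorem pvRows_append (l l' : List (Int × Int)) (c : Int) :
    pvRows (l ++ l') c = pvRows l c ++ pvRows l' c := by
  simp [pvRows, List.filter_append]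

theorem pvRows_append_singleton (l : List (Int × Int)) (m c c' : Int) :
    pvRows (l ++ [(m, c)]) c' = pvRows l c' ++ (if c = c' then [m] else []) := by
  by_cases h : c = c' <;> simp [pvRows, List.filter_append, h]

theorem pvCols_getD (static : List (Int × Int)) (c : Int) :
    (static.foldl (fun d (p : Int × Int) => d.modify p.2 [] (· ++ [p.1])) PySem.Dict.empty).getD c []
      = pvRows static c := by
  have h1 : ((static.map (fun p : Int × Int => (p.2, p.1))).foldl
      (fun d (q : Int × Int) => d.modify q.1 [] (· ++ [q.2])) PySem.Dict.empty)
      = static.foldl (fun d (p : Int × Int) => d.modify p.2 [] (· ++ [p.1])) PySem.Dict.empty := by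
    rw [List.foldl_map]
  rw [← h1]
  rw [PySem.Dict.getD_foldl_modify_append]
  simp [pvRows, List.filter_map, List.map_map, Function.comp_def]

-- A's move on the accumulated obstacle list computes the landing row pvMaxNext
theorem pvMove_eq (r c : Int) (ns : List (Int × Int)) :
    pvMove (r, c) ns = (pvMaxNext r (pvRows ns c), c) := by
  have h : ∀ p ∈ ns.filter (fun s => s.2 == (r, c).2), p.2 = c := by
    intro p hp
    simpa using (List.of_mem_filter hp)
  simpa [pvMove, pvRows] using pvMoveLoop_eq r c _ h

-- recursion forms of the two folds
def pvOutA (ns : List (Int × Int)) : List (Int × Int) → List (Int × Int)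
  | [] => []
  | bo :: rest => pvMove bo ns :: pvOutA (ns ++ [pvMove bo ns]) rest

def pvOutB (cols : PySem.Dict Int (List Int)) (d : PySem.Dict Int (List Int × Int × Option Int)) :
    List (Int × Int) → List (Int × Int)
  | [] => []
  | bo :: rest => (pvStepB cols (d, []) bo).2 ++ pvOutB cols (pvStepB cols (d, []) bo).1 rest

theorem pvFoldA_eq (bs : List (Int × Int)) : ∀ (ns acc : List (Int × Int)),
    (bs.foldl (fun (acc : List (Int × Int) × List (Int × Int)) bo =>
        (acc.1 ++ [pvMove bo acc.1], acc.2 ++ [pvMove bo acc.1])) (ns, acc)).2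
      = acc ++ pvOutA ns bs := by
  induction bs with
  | nil => intro ns acc; simp [pvOutA]
  | cons bo rest ih =>
    intro ns acc
    simp only [List.foldl_cons, pvOutA]
    rw [ih]
    simp

theorem pvFoldB_eq (cols : PySem.Dict Int (List Int)) (bs : List (Int × Int)) :
    ∀ (d : PySem.Dict Int (List Int × Int × Option Int)) (acc : List (Int × Int)),
    (bs.foldl (pvStepB cols) (d, acc)).2 = acc ++ pvOutB cols d bs := by
  induction bs with
  | nil => intro d acc; simp [pvOutB]
  | cons bo rest ih =>
    intro d acc
    simp only [List.foldl_cons, pvOutB]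
    have hstep : pvStepB cols (d, acc) bo
        = ((pvStepB cols (d, []) bo).1, acc ++ (pvStepB cols (d, []) bo).2) := by
      simp [pvStepB]
    rw [hstep, ih]
    simp

-- the per-column invariant tying B's state to the settled rows so far
def pvColInv (static bs out : List (Int × Int)) (c : Int) :
    Option (List Int × Int × Option Int) → Prop
  | none => pvRows out c = []
  | some (rem, base, lastOpt) =>
      lastOpt = some base ∧ 0 ≤ base ∧ base ∈ pvRows out c ∧ (∀ p ∈ pvRows out c, p ≤ base) ∧
      ∃ R, (∀ b ∈ bs, b.2 = c → R ≤ b.1) ∧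
        rem = (PySem.List.sorted (pvRows static c) (fun x => x) false).filter (fun s => decide (R < s)) ∧
        (∀ s ∈ pvRows static c, s ≤ R → s + 1 ≤ base) ∧
        (base = 0 ∨ ∃ o ∈ pvRows static c ++ pvRows out c, o ≤ R ∧ base = o + 1)


theorem pvFilter_filter_lt (R r' : Int) (hRr : R ≤ r') (l : List Int) :
    (l.filter (fun s => decide (R < s))).filter (fun s => decide (r' < s))
      = l.filter (fun s => decide (r' < s)) := by
  rw [List.filter_filter]
  apply List.filter_congr
  intro x _
  by_cases h : r' < x
  · have hR : R < x := by omega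
    simp [h, hR]
  · simp [h]

theorem pvColInv_mono (static : List (Int × Int)) (b : Int × Int) (bs out : List (Int × Int))
    (c : Int) (o : Option (List Int × Int × Option Int))
    (h : pvColInv static (b :: bs) out c o) : pvColInv static bs out c o := by
  match o with
  | none => exact h
  | some (rem, base, lastOpt) =>
    obtain ⟨h1, h2, h3, h4, R, hR, hrem, ha, hc⟩ := h
    exact ⟨h1, h2, h3, h4, R, fun b' hb' => hR b' (List.mem_cons_of_mem _ hb'), hrem, ha, hc⟩

theorem pvMain (static : List (Int × Int)) (cols : PySem.Dict Int (List Int))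
    (hcols : ∀ c, cols.getD c [] = pvRows static c) :
    ∀ (bs : List (Int × Int)) (d : PySem.Dict Int (List Int × Int × Option Int))
      (out : List (Int × Int)),
      bs.Pairwise (fun a b => a.1 ≤ b.1) →
      (∀ c, pvColInv static bs out c (d.get? c)) →
      pvOutA (static ++ out) bs = pvOutB cols d bs := by
  intro bs
  induction bs with
  | nil => intro d out _ _; rfl
  | cons bo rest ih =>
    intro d out hpw hinv
    obtain ⟨r, c⟩ := bo
    have hpc := List.pairwise_cons.mp hpw
    have hhead : ∀ b ∈ rest, r ≤ b.1 := hpc.1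
    have hrest := hpc.2
    -- abbreviations
    set SC := pvRows static c with hSC
    set OC := pvRows out c with hOC
    set M := pvMaxNext r (SC ++ OC) with hM
    have hMnn : 0 ≤ M := pvMaxNext_nonneg _ _
    -- A side head
    have hA : pvMove (r, c) (static ++ out) = (M, c) := by
      rw [pvMove_eq, pvRows_append]
    -- sorted statics of column c
    set sSC := PySem.List.sorted SC (fun x => x) false with hsSC
    have hsp : sSC.Pairwise (· ≤ ·) := PySem.List.sorted_pairwise SC (fun x => x)
    have hsmem : ∀ s : Int, s ∈ sSC ↔ s ∈ SC := fun s => PySem.List.mem_sorted SC (fun x => x) false s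
    -- case on B's state for column c
    have hcv := hinv c
    cases hg : d.get? c with
    | none =>
      rw [hg] at hcv
      have hOCnil : OC = [] := hcv
      -- compute B's step
      have hdr := pvDrain_eq r sSC 0 hsp le_rfl
      have hmx : pvMaxNext r sSC = pvMaxNext r SC := pvMaxNext_eq_of_mem_iff r _ _ hsmem
      have hM' : M = pvMaxNext r SC := by rw [hM, hOCnil, List.append_nil]
      have hstep : pvStepB cols (d, []) (r, c)
          = (d.insert c (sSC.dropWhile (fun s => decide (s ≤ r)), M, some M), [(M, c)]) := by
        have hcolsc : cols.getD c [] = SC := hcols c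
        have hmax : max 0 (pvMaxNext r sSC) = M := by
          have := pvMaxNext_nonneg r sSC
          rw [hmx, ← hM']; omega
        simp only [pvStepB, hg, hcolsc]
        rw [← hsSC, hdr, hmax]
        simp
      -- unfold both sides one step
      show pvMove (r, c) (static ++ out) :: pvOutA ((static ++ out) ++ [pvMove (r, c) (static ++ out)]) rest
          = (pvStepB cols (d, []) (r, c)).2 ++ pvOutB cols (pvStepB cols (d, []) (r, c)).1 rest
      rw [hA, hstep]
      simp only [List.cons_append, List.nil_append]
      congr 1
      rw [List.append_assoc]
      apply ih _ _ hrest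
      -- re-establish invariant
      intro c'
      by_cases hcc : c' = c
      · subst hcc
        rw [PySem.Dict.get?_insert_self]
        have hrows : pvRows (out ++ [(M, c')]) c' = [M] := by
          rw [pvRows_append_singleton, ← hOC, hOCnil]; simp
        refine ⟨rfl, hMnn, by rw [hrows]; simp, by rw [hrows]; simp, r, fun b hb _ => hhead b hb, ?_, ?_, ?_⟩
        · rw [pvDropWhile_filter r sSC hsp]
        · intro s hs hsr
          have : s ∈ SC ++ OC := List.mem_append_left _ hs
          have := le_pvMaxNext r s _ this hsr
          omega
        · rcases pvMaxNext_cases r (SC ++ OC) with h0 | ⟨o, ho, hor, he⟩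
          · left; rw [hM, h0]
          · right
            refine ⟨o, ?_, hor, by rw [hM, he]⟩
            rw [hrows]
            rcases List.mem_append.mp ho with h | h
            · exact List.mem_append_left _ h
            · rw [hOCnil] at h; simp at h
      · rw [PySem.Dict.get?_insert_of_ne _ _ hcc]
        have := pvColInv_mono static (r, c) rest out c' _ (hinv c')
        have hrows : pvRows (out ++ [(M, c)]) c' = pvRows out c' := by
          rw [pvRows_append_singleton]
          have hne : ¬ c = c' := fun h => hcc h.symm
          simp [hne]
        match hdg : d.get? c' with
        | none =>
          rw [hdg] at this
          show pvRows (out ++ [(M, c)]) c' = []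
          rw [hrows]; exact this
        | some st' =>
          rw [hdg] at this
          obtain ⟨rem', base', lastOpt'⟩ := st'
          obtain ⟨h1, h2, h3, h4, R, hR, hrem, ha, hc2⟩ := this
          exact ⟨h1, h2, by rw [hrows]; exact h3, by rw [hrows]; exact h4, R, hR, hrem, ha, by
            rcases hc2 with h0 | ⟨o, ho, hor, he⟩
            · exact Or.inl h0
            · exact Or.inr ⟨o, by rw [hrows]; exact ho, hor, he⟩⟩
    | some st =>
      obtain ⟨rem, base, lastOpt⟩ := st
      rw [hg] at hcv
      obtain ⟨hlast, hbnn, hbmem, hble, R, hRfb, hrem, hacct, hbcase⟩ := hcv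
      subst hlast
      have hRr : R ≤ r := hRfb (r, c) List.mem_cons_self rfl
      have hremp : rem.Pairwise (· ≤ ·) := by rw [hrem]; exact List.Pairwise.filter _ hsp
      have hdr := pvDrain_eq r rem base hremp hbnn
      -- facts for base2 = M
      have F1 : base ≤ M := by
        rcases hbcase with h0 | ⟨o, ho, hor, he⟩
        · omega
        · have := le_pvMaxNext r o (SC ++ OC) ho (by omega)
          omega
      have F2 : pvMaxNext r rem ≤ M := by
        apply pvMaxNext_le
        · intro s hs hsr
          have hsSC' : s ∈ SC := by
            rw [hrem] at hs
            exact (hsmem s).mp (List.mem_of_mem_filter hs)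
          exact le_pvMaxNext r s _ (List.mem_append_left _ hsSC') hsr
        · exact hMnn
      have F3 : base ≤ r → base + 1 ≤ M :=
        fun hbr => le_pvMaxNext r base _ (List.mem_append_right _ hbmem) hbr
      set base2 : Int := if base ≤ r then max (max base (pvMaxNext r rem)) (base + 1)
          else max base (pvMaxNext r rem) with hb2
      have hb2nn : 0 ≤ base2 := by rw [hb2]; split <;> omega
      have F4 : M ≤ base2 := by
        apply pvMaxNext_le
        · intro s hs hsr
          rcases List.mem_append.mp hs with hsc | hso
          · by_cases hsR : s ≤ R
            · have := hacct s hsc hsR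
              rw [hb2]; split <;> omega
            · have hsrem : s ∈ rem := by
                rw [hrem, List.mem_filter]
                exact ⟨(hsmem s).mpr hsc, by simp; omega⟩
              have := le_pvMaxNext r s rem hsrem hsr
              rw [hb2]; split <;> omega
          · have := hble s hso
            rw [hb2]; split <;> omega
        · exact hb2nn
      have hbase2 : base2 = M := by
        have : base2 ≤ M := by
          rw [hb2]; split
          · rename_i hbr; have := F3 hbr; omega
          · omega
        omega
      have hstep : pvStepB cols (d, []) (r, c)
          = (d.insert c (rem.dropWhile (fun s => decide (s ≤ r)), M, some M), [(M, c)]) := by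
        simp only [pvStepB, hg, hdr]
        rw [← hbase2, hb2]
        simp
      show pvMove (r, c) (static ++ out) :: pvOutA ((static ++ out) ++ [pvMove (r, c) (static ++ out)]) rest
          = (pvStepB cols (d, []) (r, c)).2 ++ pvOutB cols (pvStepB cols (d, []) (r, c)).1 rest
      rw [hA, hstep]
      simp only [List.cons_append, List.nil_append]
      congr 1
      rw [List.append_assoc]
      apply ih _ _ hrest
      intro c'
      by_cases hcc : c' = c
      · subst hcc
        rw [PySem.Dict.get?_insert_self]
        have hrows : pvRows (out ++ [(M, c')]) c' = OC ++ [M] := by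
          rw [pvRows_append_singleton, ← hOC]; simp
        refine ⟨rfl, hMnn, by rw [hrows]; simp, ?_, r, fun b hb _ => hhead b hb, ?_, ?_, ?_⟩
        · intro p hp
          rw [hrows] at hp
          rcases List.mem_append.mp hp with h | h
          · have := hble p h; omega
          · simp at h; omega
        · rw [hrem, pvDropWhile_filter r _ (List.Pairwise.filter _ hsp),
            pvFilter_filter_lt R r hRr]
        · intro s hs hsr
          have := le_pvMaxNext r s (SC ++ OC) (List.mem_append_left _ hs) hsr
          omega
        · rcases pvMaxNext_cases r (SC ++ OC) with h0 | ⟨o, ho, hor, he⟩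
          · left; rw [hM, h0]
          · right
            refine ⟨o, ?_, hor, by rw [hM, he]⟩
            rw [hrows]
            rcases List.mem_append.mp ho with h | h
            · exact List.mem_append_left _ h
            · exact List.mem_append_right _ (List.mem_append_left _ h)
      · rw [PySem.Dict.get?_insert_of_ne _ _ hcc]
        have := pvColInv_mono static (r, c) rest out c' _ (hinv c')
        have hrows : pvRows (out ++ [(M, c)]) c' = pvRows out c' := by
          rw [pvRows_append_singleton]
          have hne : ¬ c = c' := fun h => hcc h.symm
          simp [hne]
        match hdg : d.get? c' with
        | none =>
          rw [hdg] at this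
          show pvRows (out ++ [(M, c)]) c' = []
          rw [hrows]; exact this
        | some st' =>
          rw [hdg] at this
          obtain ⟨rem', base', lastOpt'⟩ := st'
          obtain ⟨h1, h2, h3, h4, R', hR', hrem', ha', hc2⟩ := this
          exact ⟨h1, h2, by rw [hrows]; exact h3, by rw [hrows]; exact h4, R', hR', hrem', ha', by
            rcases hc2 with h0 | ⟨o, ho, hor, he⟩
            · exact Or.inl h0
            · exact Or.inr ⟨o, by rw [hrows]; exact ho, hor, he⟩⟩

-- ===== VERDICT (by name: the statement is the Claim_ definition above) =====
theorem moveall_spec : Claim_equal_moveall := by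
  unfold Claim_equal_moveall Spec_moveall
  intro boulders static _
  unfold moveall moveall_alt
  rw [pvFoldA_eq, pvFoldB_eq]
  simp only [List.nil_append]
  have h := pvMain static
    (static.foldl (fun d (p : Int × Int) => d.modify p.2 [] (· ++ [p.1])) PySem.Dict.empty)
    (fun c => pvCols_getD static c)
    (PySem.List.sorted boulders (fun x => x.1) false) PySem.Dict.empty []
    (PySem.List.sorted_pairwise boulders (fun x => x.1))
    (fun c => by simp [pvColInv, PySem.Dict.get?_empty, pvRows])
  rw [List.append_nil] at h
  exact h
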